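-- pv_equiv track=rewrite | github.com/tomulanovski/gene2net | scripts/fix_network_naming.py | extract_leaf_names_robust
-- ===== SOURCE A (Python) =====
-- def extract_leaf_names_robust(tree_str):
--     """More robust leaf extraction that handles edge cases."""
--     leaves = []
--     i = 0
--     n = len(tree_str)
--
--     while i < n:
--         # Skip whitespace
--         if tree_str[i] in ' \t\n\r':
--             i += 1
--             continue
--
--         # After ( or , we might have a leaf name
--         if tree_str[i] in '(,':
--             i += 1
--             # Skip whitespace
--             while i < n and tree_str[i] in ' \t\n\r':
--                 i += 1
--
--             # Check if next char starts a name (letter)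
--             if i < n and (tree_str[i].isalpha() or tree_str[i] == '_'):
--                 # Read the name
--                 start = i
--                 while i < n and tree_str[i] not in ':,)(\t\n\r #;':
--                     i += 1
--                 name = tree_str[start:i].strip()
--                 if name and not name.replace('.', '').replace('-', '').replace('e', '').replace('E', '').isdigit():
--                     leaves.append(name)
--             continue
--
--         i += 1
--
--     return leaves
-- ===== SOURCE B (Python) =====
-- # Same extraction via one split pass: every leaf candidate sits at the start of a
-- # chunk between '('/',' delimiters, so normalise '(' to ',', split once, and keep
-- # the chunks whose leading token looks like a name.
--
-- def _leaf_name(chunk):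
--     """Leaf name at the start of a delimiter-free chunk, or None."""
--     cand = chunk.lstrip()
--     if not (cand[:1].isalpha() or cand[:1] == '_'):
--         return None
--     kept = []
--     for ch in cand:
--         if ch in ':,)(\t\n\r #;':
--             break
--         kept.append(ch)
--     name = ''.join(kept)
--     if name.replace('.', '').replace('-', '').replace('e', '').replace('E', '').isdigit():
--         return None
--     return name
--
--
-- def extract_leaf_names_robust(tree_str):
--     chunks = tree_str.replace('(', ',').split(',')
--     return [name for name in map(_leaf_name, chunks[1:]) if name is not None]
-- ===== Notes on version B (the rewrite author's own statement) =====
-- stated objective: faster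
-- what changed: Replaces the index-driven character state machine with a single split pass: opening parentheses are normalised to the comma delimiter, the string is split once, and each chunk after a delimiter is reduced to its leading name token by a small helper, the survivors collected by a comprehension.
import Mathlib
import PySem

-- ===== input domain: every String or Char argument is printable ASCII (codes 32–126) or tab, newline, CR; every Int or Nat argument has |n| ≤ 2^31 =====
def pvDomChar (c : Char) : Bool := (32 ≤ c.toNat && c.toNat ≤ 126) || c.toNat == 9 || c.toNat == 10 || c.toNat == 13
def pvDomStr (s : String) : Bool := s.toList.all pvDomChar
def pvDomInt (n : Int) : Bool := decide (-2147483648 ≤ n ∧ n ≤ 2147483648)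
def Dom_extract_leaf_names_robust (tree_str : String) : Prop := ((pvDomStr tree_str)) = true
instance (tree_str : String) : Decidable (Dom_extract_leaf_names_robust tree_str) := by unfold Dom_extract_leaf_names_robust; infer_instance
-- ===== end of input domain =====

-- B replaces A's index-driven character state machine by one split pass ('(' normalised to ',',
-- split once on ',', each chunk reduced to its leading name token); return values proved equal on Dom.


-- ===== PORT A =====

-- c in ' \t\n\r'
def pvIsWs (c : Char) : Bool := c == ' ' || c == '\t' || c == '\n' || c == '\r'
-- c in ':,)(\t\n\r #;'
def pvIsTerm (c : Char) : Bool :=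
  c == ':' || c == ',' || c == ')' || c == '(' || c == '\t' || c == '\n' || c == '\r' || c == ' ' || c == '#' || c == ';'
-- name.replace('.','').replace('-','').replace('e','').replace('E','').isdigit()  (shared literal of both sources)
def pvNumericLike (s : List Char) : Bool :=
  PySem.Chars.strIsdigit
    (PySem.Chars.replace (PySem.Chars.replace (PySem.Chars.replace (PySem.Chars.replace s ['.'] []) ['-'] []) ['e'] []) ['E'] [])

-- inner 'while i < n and tree_str[i] in " \t\n\r": i += 1'
def pvA_skipWs (cs : List Char) (i : Nat) : Nat :=
  if h : i < cs.length then
    if pvIsWs cs[i] then pvA_skipWs cs (i + 1) else i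
  else i
termination_by cs.length - i

-- inner 'while i < n and tree_str[i] not in ":,)(\t\n\r #;": i += 1'
def pvA_readName (cs : List Char) (i : Nat) : Nat :=
  if h : i < cs.length then
    if pvIsTerm cs[i] then i else pvA_readName cs (i + 1)
  else i
termination_by cs.length - i

theorem pvA_skipWs_ge (cs : List Char) (i : Nat) : i ≤ pvA_skipWs cs i := by
  fun_induction pvA_skipWs cs i with
  | case1 i h hws ih => omega
  | case2 i h hws => omega
  | case3 i h => omega

theorem pvA_readName_ge (cs : List Char) (i : Nat) : i ≤ pvA_readName cs i := by
  fun_induction pvA_readName cs i with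
  | case1 i h ht => omega
  | case2 i h ht ih => omega
  | case3 i h => omega

-- the main 'while i < n' loop of A, state = (i, leaves)
def pvA_loop (cs : List Char) (i : Nat) (leaves : List String) : List String :=
  if h : i < cs.length then
    if pvIsWs cs[i] then pvA_loop cs (i + 1) leaves
    else if cs[i] = '(' ∨ cs[i] = ',' then
      let j := pvA_skipWs cs (i + 1)
      if hj : j < cs.length then
        -- 'i < n and (…isalpha() or == '_')' short-circuits: nested ifs
        if PySem.Chars.isalpha cs[j] = true ∨ cs[j] = '_' then
          let k := pvA_readName cs j
          let name := PySem.Chars.strip (PySem.List.slice cs (some (j : Int)) (some (k : Int)))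
          if name ≠ [] ∧ pvNumericLike name = false then pvA_loop cs k (leaves ++ [String.mk name])
          else pvA_loop cs k leaves
        else pvA_loop cs j leaves
      else pvA_loop cs j leaves
    else pvA_loop cs (i + 1) leaves
  else leaves
termination_by cs.length - i
decreasing_by
  all_goals
    (first
      | omega
      | (have h1 := pvA_skipWs_ge cs (i + 1)
         have h2 := pvA_readName_ge cs (pvA_skipWs cs (i + 1))
         omega))

def extract_leaf_names_robust (tree_str : String) : List String :=
  pvA_loop tree_str.toList 0 []

-- ===== PORT B =====

-- the for/break/append loop collecting chars of cand before the first terminator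
def pvB_kept : List Char → List Char
  | [] => []
  | c :: rest => if pvIsTerm c then [] else c :: pvB_kept rest

-- _leaf_name(chunk): leading name token of a chunk, or None
def pvB_leafName (chunk : List Char) : Option String :=
  let cand := PySem.Chars.lstrip chunk
  if ¬ (PySem.Chars.strIsalpha (PySem.List.slice cand none (some 1)) = true ∨
        PySem.List.slice cand none (some 1) = ['_']) then none
  else
    let name := pvB_kept cand
    if pvNumericLike name = true then none else some (String.mk name)

def extract_leaf_names_robust_alt (tree_str : String) : List String :=
  let chunks := PySem.Chars.splitOn (PySem.Chars.replace tree_str.toList ['('] [',']) [',']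
  (PySem.List.slice chunks (some (1 : Int)) none).filterMap pvB_leafName

-- ===== PRECONDITION & SPEC =====
def Spec_extract_leaf_names_robust (tree_str : String) (out : List String) : Prop := out = extract_leaf_names_robust_alt tree_str
instance (tree_str : String) (out : List String) : Decidable (Spec_extract_leaf_names_robust tree_str out) := by unfold Spec_extract_leaf_names_robust; infer_instance

-- ===== CLAIM (what is proved, stated in full; the proofs are below) =====
def Claim_equal_extract_leaf_names_robust : Prop := ∀ (tree_str : String), Dom_extract_leaf_names_robust tree_str → Spec_extract_leaf_names_robust tree_str (extract_leaf_names_robust tree_str)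

-- ===== LEMMAS AND PROOFS =====

def pvDelim (c : Char) : Bool := c == '(' || c == ','
def pvMapF (c : Char) : Char := if c == '(' then ',' else c

-- candidates emitted per delimiter, scanning left to right
def pvGB : List Char → List String
  | [] => []
  | c :: rest => if pvDelim c then (pvB_leafName rest).toList ++ pvGB rest else pvGB rest

theorem pvGB_cons (c : Char) (rest : List Char) :
    pvGB (c :: rest) = if pvDelim c then (pvB_leafName rest).toList ++ pvGB rest else pvGB rest := rfl

-- split on ',' as a structural recursion
def pvSplitC : List Char → List (List Char)
  | [] => [[]]
  | c :: rest => if c == ',' then [] :: pvSplitC rest else (c :: (pvSplitC rest).headI) :: (pvSplitC rest).tail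

-- split on '(' or ','
def pvSplitD : List Char → List (List Char)
  | [] => [[]]
  | c :: rest => if pvDelim c then [] :: pvSplitD rest else (c :: (pvSplitD rest).headI) :: (pvSplitD rest).tail

-- ---- character class facts ----

theorem pv_char_ofNat (c : Char) (n : Nat) (d : Char) (h1 : c.toNat = n) (h2 : Char.ofNat n = d) :
    c = d := by
  calc c = Char.ofNat c.toNat := (Char.ofNat_toNat c).symm
    _ = Char.ofNat n := by rw [h1]
    _ = d := h2

theorem pv_ws_eq_isspace (c : Char) (h : pvDomChar c = true) : PySem.Chars.isspace c = pvIsWs c := by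
  unfold pvDomChar at h
  unfold PySem.Chars.isspace pvIsWs
  simp only [Bool.or_eq_true, Bool.and_eq_true, decide_eq_true_eq, Nat.beq_eq_true_eq] at h ⊢
  rw [Bool.eq_iff_iff]
  simp only [Bool.or_eq_true, Bool.and_eq_true, beq_iff_eq, decide_eq_true_eq]
  constructor
  · intro hs
    have hn : c.toNat = 32 ∨ c.toNat = 9 ∨ c.toNat = 10 ∨ c.toNat = 13 := by omega
    rcases hn with hn | hn | hn | hn
    · exact Or.inl (Or.inl (Or.inl (pv_char_ofNat c 32 ' ' hn (by decide))))
    · exact Or.inl (Or.inl (Or.inr (pv_char_ofNat c 9 '\t' hn (by decide))))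
    · exact Or.inl (Or.inr (pv_char_ofNat c 10 '\n' hn (by decide)))
    · exact Or.inr (pv_char_ofNat c 13 '\r' hn (by decide))
  · rintro (((hc | hc) | hc) | hc) <;> subst hc <;> decide

theorem pv_ws_not_delim (c : Char) (h : pvIsWs c = true) : pvDelim c = false := by
  unfold pvIsWs at h
  simp only [Bool.or_eq_true, beq_iff_eq] at h
  rcases h with ((h | h) | h) | h <;> subst h <;> decide

theorem pv_delim_term (c : Char) (h : pvDelim c = true) : pvIsTerm c = true := by
  unfold pvDelim at h
  simp only [Bool.or_eq_true, beq_iff_eq] at h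
  rcases h with h | h <;> subst h <;> decide

theorem pv_ws_term (c : Char) (h : pvIsWs c = true) : pvIsTerm c = true := by
  unfold pvIsWs at h
  simp only [Bool.or_eq_true, beq_iff_eq] at h
  rcases h with ((h | h) | h) | h <;> subst h <;> decide

theorem pv_alpha_not_term (c : Char) (h : PySem.Chars.isalpha c = true ∨ c = '_') : pvIsTerm c = false := by
  cases hterm : pvIsTerm c with
  | false => rfl
  | true =>
    exfalso
    unfold pvIsTerm at hterm
    simp only [Bool.or_eq_true, beq_iff_eq] at hterm
    rcases hterm with ((((((((ht | ht) | ht) | ht) | ht) | ht) | ht) | ht) | ht) | ht <;>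
      subst ht <;> revert h <;> decide

theorem pv_delim_not_alpha (c : Char) (h : pvDelim c = true) :
    (PySem.Chars.isalpha c = true ∨ c = '_') → False := by
  intro ha
  have := pv_alpha_not_term c ha
  have := pv_delim_term c h
  simp_all

-- ---- generic list lemmas ----

theorem pv_dropWhile_congr {p q : Char → Bool} (l : List Char) (h : ∀ c ∈ l, p c = q c) :
    l.dropWhile p = l.dropWhile q := by
  induction l with
  | nil => rfl
  | cons c rest ih =>
    have hc := h c (by simp)
    have hrest : ∀ c ∈ rest, p c = q c := fun c hm => h c (by simp [hm])
    by_cases hq : q c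
    · simp [List.dropWhile_cons, hc, hq, ih hrest]
    · simp [List.dropWhile_cons, hc, hq]

theorem pv_dropWhile_eq_self {p : Char → Bool} (l : List Char) (h : ∀ c ∈ l, p c = false) :
    l.dropWhile p = l := by
  cases l with
  | nil => rfl
  | cons c rest => simp [List.dropWhile_cons, h c (by simp)]

theorem pv_strip_id (l : List Char) (h : ∀ c ∈ l, PySem.Chars.isspace c = false) :
    PySem.Chars.strip l = l := by
  unfold PySem.Chars.strip PySem.Chars.rstrip PySem.Chars.lstrip
  rw [pv_dropWhile_eq_self l h]
  rw [pv_dropWhile_eq_self l.reverse (fun c hm => h c (List.mem_reverse.mp hm))]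
  exact List.reverse_reverse l

theorem pv_dropWhile_takeWhile {p q : Char → Bool} (l : List Char) (h : ∀ c, p c = true → q c = true) :
    (l.takeWhile q).dropWhile p = (l.dropWhile p).takeWhile q := by
  induction l with
  | nil => rfl
  | cons c rest ih =>
    by_cases hp : p c
    · simp [List.takeWhile_cons, List.dropWhile_cons, hp, h c hp, ih]
    · by_cases hq : q c
      · simp [List.takeWhile_cons, List.dropWhile_cons, hp, hq]
      · simp [List.takeWhile_cons, List.dropWhile_cons, hp, hq]

-- ---- B-side characterisations ----

theorem pvB_kept_eq (l : List Char) : pvB_kept l = l.takeWhile (fun c => !pvIsTerm c) := by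
  induction l with
  | nil => rfl
  | cons c rest ih =>
    by_cases ht : pvIsTerm c
    · simp [pvB_kept, ht, List.takeWhile_cons]
    · simp [pvB_kept, ht, List.takeWhile_cons, ih]

theorem pv_replace_go (fuel : Nat) : ∀ (l acc : List Char), l.length ≤ fuel →
    PySem.Chars.replace.go ['('] [','] fuel l acc = acc.reverse ++ l.map pvMapF := by
  induction fuel with
  | zero =>
    intro l acc h
    have hl : l = [] := List.length_eq_zero_iff.mp (by omega)
    subst hl
    simp [PySem.Chars.replace.go]
  | succ n ih =>
    intro l acc h
    cases l with
    | nil => simp [PySem.Chars.replace.go]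
    | cons c t =>
      by_cases hc : c = '('
      · subst hc
        have : List.isPrefixOf ['('] ('(' :: t) = true := by simp [List.isPrefixOf]
        rw [PySem.Chars.replace.go, if_pos this]
        rw [ih _ _ (by simpa using Nat.le_of_succ_le_succ h)]
        simp [pvMapF]
      · have : List.isPrefixOf ['('] (c :: t) = false := by
          simp [List.isPrefixOf]
          exact fun hq => absurd hq.symm hc
        rw [PySem.Chars.replace.go, if_neg (by simp [this])]
        rw [ih _ _ (by simpa using Nat.le_of_succ_le_succ h)]
        simp [pvMapF, hc]

theorem pv_replace_single (cs : List Char) :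
    PySem.Chars.replace cs ['('] [','] = cs.map pvMapF := by
  unfold PySem.Chars.replace
  rw [if_neg (by simp)]
  simpa using pv_replace_go cs.length cs [] le_rfl

theorem pvSplitC_ne_nil (l : List Char) : pvSplitC l ≠ [] := by
  cases l with
  | nil => simp [pvSplitC]
  | cons c rest =>
    by_cases hc : c == ','
    · simp [pvSplitC, hc]
    · simp [pvSplitC, hc]

theorem pvSplitC_cons_headI_tail (l : List Char) :
    (pvSplitC l).headI :: (pvSplitC l).tail = pvSplitC l := by
  cases hl : pvSplitC l with
  | nil => exact absurd hl (pvSplitC_ne_nil l)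
  | cons a t => simp

theorem pvSplitD_ne_nil (l : List Char) : pvSplitD l ≠ [] := by
  cases l with
  | nil => simp [pvSplitD]
  | cons c rest =>
    by_cases hc : pvDelim c
    · simp [pvSplitD, hc]
    · simp [pvSplitD, hc]

theorem pvSplitD_cons_headI_tail (l : List Char) :
    (pvSplitD l).headI :: (pvSplitD l).tail = pvSplitD l := by
  cases hl : pvSplitD l with
  | nil => exact absurd hl (pvSplitD_ne_nil l)
  | cons a t => simp

theorem pv_splitOn_go (fuel : Nat) : ∀ (l cur acc : List Char) (accs : List (List Char)),
    l.length ≤ fuel →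
    PySem.Chars.splitOn.go [','] fuel l cur accs.reverse =
      accs ++ ((cur.reverse ++ (pvSplitC l).headI) :: (pvSplitC l).tail) := by
  induction fuel with
  | zero =>
    intro l cur acc accs h
    have hl : l = [] := List.length_eq_zero_iff.mp (by omega)
    subst hl
    simp [PySem.Chars.splitOn.go, pvSplitC]
  | succ n ih =>
    intro l cur acc accs h
    cases l with
    | nil => simp [PySem.Chars.splitOn.go, pvSplitC]
    | cons c t =>
      by_cases hc : c = ','
      · subst hc
        have hpre : List.isPrefixOf [','] (',' :: t) = true := by simp [List.isPrefixOf]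
        rw [PySem.Chars.splitOn.go, if_pos hpre]
        have : cur.reverse :: accs.reverse = (accs ++ [cur.reverse]).reverse := by simp
        rw [show (List.drop [','].length (',' :: t)) = t by simp, this,
            ih t [] acc (accs ++ [cur.reverse]) (by simpa using Nat.le_of_succ_le_succ h)]
        simp only [pvSplitC, beq_self_eq_true, if_pos]
        rw [List.append_assoc]
        simp [pvSplitC_cons_headI_tail]
      · have hpre : List.isPrefixOf [','] (c :: t) = false := by
          simp [List.isPrefixOf]
          exact fun hq => absurd hq.symm hc
        rw [PySem.Chars.splitOn.go, if_neg (by simp [hpre]),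
            ih t (c :: cur) acc accs (by simpa using Nat.le_of_succ_le_succ h)]
        have hcb : (c == ',') = false := by simpa using hc
        simp [pvSplitC, hcb]

theorem pv_splitOn_single (cs : List Char) : PySem.Chars.splitOn cs [','] = pvSplitC cs := by
  unfold PySem.Chars.splitOn
  have := pv_splitOn_go (cs.length + 1) cs [] [] [] (by omega)
  simp only [List.reverse_nil] at this
  rw [this]
  simpa using pvSplitC_cons_headI_tail cs

theorem pvSplitC_map (l : List Char) : pvSplitC (l.map pvMapF) = pvSplitD l := by
  induction l with
  | nil => rfl
  | cons c rest ih =>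
    by_cases hd : pvDelim c
    · have : pvMapF c = ',' := by
        unfold pvDelim at hd
        simp only [Bool.or_eq_true, beq_iff_eq] at hd
        rcases hd with h | h <;> subst h <;> rfl
      simp [pvSplitC, pvSplitD, this, hd, ih]
    · have h1 : (c == '(') = false := by
        unfold pvDelim at hd; simp at hd; simpa using hd.1
      have h2 : (pvMapF c == ',') = false := by
        unfold pvDelim at hd; simp at hd
        simp [pvMapF, h1]
        simpa using hd.2
      have h3 : ¬c = ',' := by
        unfold pvDelim at hd; simp at hd; exact hd.2
      simp [pvSplitC, pvSplitD, List.map_cons, h2, hd, ih, pvMapF, h1, h3]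

theorem pvSplitD_headI (l : List Char) : (pvSplitD l).headI = l.takeWhile (fun c => !pvDelim c) := by
  induction l with
  | nil => rfl
  | cons c rest ih =>
    by_cases hd : pvDelim c
    · simp [pvSplitD, hd, List.takeWhile_cons]
    · simp [pvSplitD, hd, List.takeWhile_cons, ih]

theorem pv_isspace_not_delim (c : Char) (h : PySem.Chars.isspace c = true) :
    (!pvDelim c) = true := by
  cases hd : pvDelim c with
  | false => rfl
  | true =>
    exfalso
    unfold pvDelim at hd
    simp only [Bool.or_eq_true, beq_iff_eq] at hd
    rcases hd with h' | h' <;> subst h' <;> exact absurd h (by decide)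

theorem pv_takeWhile_term_delim (l : List Char) :
    (l.takeWhile (fun c => !pvDelim c)).takeWhile (fun c => !pvIsTerm c)
      = l.takeWhile (fun c => !pvIsTerm c) := by
  rw [List.takeWhile_takeWhile]
  have hfun : (fun a => decide ((!pvIsTerm a) = true ∧ (!pvDelim a) = true))
      = (fun c => !pvIsTerm c) := by
    funext c
    by_cases ht : pvIsTerm c
    · simp [ht]
    · have : pvDelim c = false := by
        cases hd : pvDelim c with
        | false => rfl
        | true => exact absurd (pv_delim_term c hd) (by simp [ht])
      simp [ht, this]
  rw [hfun]

theorem pv_take1 (xs : List Char) : PySem.List.slice xs none (some 1) = xs.take 1 := by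
  rw [PySem.List.slice_to xs (by norm_num : (0 : Int) ≤ 1)]
  norm_num

-- the body of _leaf_name after the lstrip, as a function of the stripped candidate
def pvF (cand : List Char) : Option String :=
  if ¬ (PySem.Chars.strIsalpha (cand.take 1) = true ∨ cand.take 1 = ['_']) then none
  else if pvNumericLike (pvB_kept cand) = true then none else some (String.mk (pvB_kept cand))

theorem pvB_leafName_eq_F (chunk : List Char) :
    pvB_leafName chunk = pvF (chunk.dropWhile PySem.Chars.isspace) := by
  unfold pvB_leafName pvF PySem.Chars.lstrip
  simp only [pv_take1]

theorem pvF_takeWhile (m : List Char) :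
    pvF (m.takeWhile (fun c => !pvDelim c)) = pvF m := by
  rcases m with _ | ⟨d, rest⟩
  · rfl
  · by_cases hd : pvDelim d
    · have hcand : (d :: rest).takeWhile (fun c => !pvDelim c) = [] := by
        simp [List.takeWhile_cons, hd]
      rw [hcand]
      have hna : PySem.Chars.isalpha d = false := by
        cases ha : PySem.Chars.isalpha d with
        | false => rfl
        | true => exact absurd (Or.inl ha) (pv_delim_not_alpha d hd)
      have hnu : ¬d = '_' := fun he => pv_delim_not_alpha d hd (Or.inr he)
      have h2 : pvF (d :: rest) = none := by
        unfold pvF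
        rw [if_pos]
        simp [PySem.Chars.strIsalpha, hna, hnu]
      rw [h2]
      rfl
    · have hcand : (d :: rest).takeWhile (fun c => !pvDelim c)
          = d :: rest.takeWhile (fun c => !pvDelim c) := by
        simp [List.takeWhile_cons, hd]
      rw [hcand]
      unfold pvF
      rw [pvB_kept_eq, pvB_kept_eq]
      have hk : (d :: rest.takeWhile (fun c => !pvDelim c)).takeWhile (fun c => !pvIsTerm c)
          = (d :: rest).takeWhile (fun c => !pvIsTerm c) := by
        have := pv_takeWhile_term_delim (d :: rest)
        simpa [List.takeWhile_cons, hd] using this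
      rw [hk]
      simp

theorem pv_leafName_takeWhile (l : List Char) :
    pvB_leafName (l.takeWhile (fun c => !pvDelim c)) = pvB_leafName l := by
  rw [pvB_leafName_eq_F, pvB_leafName_eq_F,
      pv_dropWhile_takeWhile l (fun c h => pv_isspace_not_delim c h), pvF_takeWhile]

theorem pv_filterMap_splitD_tail (l : List Char) :
    ((pvSplitD l).tail).filterMap pvB_leafName = pvGB l := by
  induction l with
  | nil => rfl
  | cons c rest ih =>
    by_cases hd : pvDelim c
    · have h1 : (pvSplitD (c :: rest)).tail = pvSplitD rest := by simp [pvSplitD, hd]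
      rw [h1, ← pvSplitD_cons_headI_tail rest, List.filterMap_cons]
      rw [pvSplitD_headI, pv_leafName_takeWhile, ih, pvGB_cons, if_pos hd]
      cases pvB_leafName rest <;> simp
    · have h1 : (pvSplitD (c :: rest)).tail = (pvSplitD rest).tail := by simp [pvSplitD, hd]
      rw [h1, ih, pvGB_cons, if_neg (by simp [hd])]

-- ---- A-side characterisations ----

theorem pvA_skipWs_le (cs : List Char) (i : Nat) (h : i ≤ cs.length) : pvA_skipWs cs i ≤ cs.length := by
  fun_induction pvA_skipWs cs i with
  | case1 i h' hws ih => exact ih (by omega)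
  | case2 i h' hws => omega
  | case3 i h' => omega

theorem pvA_readName_le (cs : List Char) (i : Nat) (h : i ≤ cs.length) : pvA_readName cs i ≤ cs.length := by
  fun_induction pvA_readName cs i with
  | case1 i h' ht => omega
  | case2 i h' ht ih => exact ih (by omega)
  | case3 i h' => omega

theorem pvA_skipWs_drop (cs : List Char) (i : Nat) :
    cs.drop (pvA_skipWs cs i) = (cs.drop i).dropWhile pvIsWs := by
  fun_induction pvA_skipWs cs i with
  | case1 i h hws ih =>
    rw [List.drop_eq_getElem_cons h, List.dropWhile_cons, if_pos hws, ih]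
  | case2 i h hws =>
    rw [List.drop_eq_getElem_cons h, List.dropWhile_cons, if_neg (by simp [hws])]
  | case3 i h =>
    rw [List.drop_eq_nil_of_le (by omega)]
    rfl

theorem pvA_skipWs_range (cs : List Char) (i m : Nat) (h1 : i ≤ m) (h2 : m < pvA_skipWs cs i)
    (hm : m < cs.length) : pvIsWs cs[m] = true := by
  fun_induction pvA_skipWs cs i generalizing m with
  | case1 i h hws ih =>
    by_cases he : m = i
    · subst he; exact hws
    · exact ih m (by omega) h2 hm
  | case2 i h hws => omega
  | case3 i h => omega

theorem pvA_readName_take (cs : List Char) (j : Nat) :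
    (cs.drop j).take (pvA_readName cs j - j) = (cs.drop j).takeWhile (fun c => !pvIsTerm c) := by
  fun_induction pvA_readName cs j with
  | case1 j h ht =>
    rw [List.drop_eq_getElem_cons h, List.takeWhile_cons]
    simp [ht]
  | case2 j h ht ih =>
    have hge := pvA_readName_ge cs (j + 1)
    rw [List.drop_eq_getElem_cons h, List.takeWhile_cons]
    have harith : pvA_readName cs (j + 1) - j = (pvA_readName cs (j + 1) - (j + 1)) + 1 := by omega
    rw [harith, List.take_succ_cons, ih]
    simp [ht]
  | case3 j h =>
    rw [List.drop_eq_nil_of_le (by omega)]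
    simp

theorem pvA_readName_range (cs : List Char) (j m : Nat) (h1 : j ≤ m) (h2 : m < pvA_readName cs j)
    (hm : m < cs.length) : pvIsTerm cs[m] = false := by
  fun_induction pvA_readName cs j generalizing m with
  | case1 j h ht => omega
  | case2 j h ht ih =>
    by_cases he : m = j
    · subst he; simpa using ht
    · exact ih m (by omega) h2 hm
  | case3 j h => omega

theorem pvGB_drop_congr (cs : List Char) (a b : Nat) (hab : a ≤ b) (hb : b ≤ cs.length)
    (h : ∀ m (hm : m < cs.length), a ≤ m → m < b → pvDelim cs[m] = false) :
    pvGB (cs.drop a) = pvGB (cs.drop b) := by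
  induction hd : b - a generalizing a with
  | zero =>
    have : a = b := by omega
    subst this; rfl
  | succ n ih =>
    have ha : a < cs.length := by omega
    rw [List.drop_eq_getElem_cons ha, pvGB_cons,
        if_neg (by simp [h a ha le_rfl (by omega)])]
    exact ih (a + 1) (by omega) (fun m hm h1 h2 => h m hm (by omega) h2) (by omega)

-- what A's delimiter branch yields as an (optional) appended name, given j = skipWs position
def pvEmitA (cs : List Char) (j : Nat) : Option String :=
  if hj : j < cs.length then
    if PySem.Chars.isalpha cs[j] = true ∨ cs[j] = '_' then
      let k := pvA_readName cs j
      let name := PySem.Chars.strip (PySem.List.slice cs (some (j : Int)) (some (k : Int)))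
      if name ≠ [] ∧ pvNumericLike name = false then some (String.mk name) else none
    else none
  else none

theorem pv_strIsalpha_single (c : Char) : PySem.Chars.strIsalpha [c] = PySem.Chars.isalpha c := by
  simp [PySem.Chars.strIsalpha]

theorem pv_name_eq (cs : List Char) (j : Nat) (hdom : ∀ c ∈ cs, pvDomChar c = true) :
    PySem.Chars.strip (PySem.List.slice cs (some (j : Int)) (some ((pvA_readName cs j) : Int)))
      = pvB_kept (cs.drop j) := by
  rw [PySem.List.slice_natCast, pvA_readName_take, pvB_kept_eq]
  apply pv_strip_id
  intro c hm
  have hterm : pvIsTerm c = false := by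
    have := List.mem_takeWhile_imp hm
    simpa using this
  have hws : pvIsWs c = false := by
    cases hw : pvIsWs c with
    | false => rfl
    | true => exact absurd (pv_ws_term c hw) (by simp [hterm])
  have hd : pvDomChar c = true :=
    hdom c (List.drop_subset j cs (List.takeWhile_subset _ hm))
  rw [pv_ws_eq_isspace c hd, hws]

theorem pv_leafName_suffix (cs : List Char) (i : Nat) (hdom : ∀ c ∈ cs, pvDomChar c = true) :
    pvB_leafName (cs.drop (i + 1)) = pvEmitA cs (pvA_skipWs cs (i + 1)) := by
  rw [pvB_leafName_eq_F]
  have hws : (cs.drop (i + 1)).dropWhile PySem.Chars.isspace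
      = (cs.drop (i + 1)).dropWhile pvIsWs :=
    pv_dropWhile_congr _ (fun c hm =>
      pv_ws_eq_isspace c (hdom c (List.drop_subset (i + 1) cs hm)))
  rw [hws, ← pvA_skipWs_drop]
  set j := pvA_skipWs cs (i + 1) with hjdef
  unfold pvEmitA
  by_cases hj : j < cs.length
  · rw [dif_pos hj]
    have hcons : cs.drop j = cs[j] :: cs.drop (j + 1) := List.drop_eq_getElem_cons hj
    have htake1 : (cs.drop j).take 1 = [cs[j]] := by rw [hcons]; rfl
    by_cases ha : PySem.Chars.isalpha cs[j] = true ∨ cs[j] = '_'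
    · rw [if_pos ha]
      have hterm : pvIsTerm cs[j] = false := pv_alpha_not_term cs[j] ha
      have hcond : ¬¬(PySem.Chars.strIsalpha ((cs.drop j).take 1) = true
          ∨ (cs.drop j).take 1 = ['_']) := by
        rw [htake1, pv_strIsalpha_single]
        intro hc
        rcases ha with h' | h'
        · exact hc (Or.inl h')
        · exact hc (Or.inr (by rw [h']))
      have hguard : pvF (cs.drop j)
          = (if pvNumericLike (pvB_kept (cs.drop j)) = true then none
             else some (String.mk (pvB_kept (cs.drop j)))) := by
        unfold pvF
        rw [if_neg hcond]
      rw [hguard]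
      have hname : PySem.Chars.strip (PySem.List.slice cs (some (j : Int))
            (some ((pvA_readName cs j) : Int))) = pvB_kept (cs.drop j) :=
        pv_name_eq cs j hdom
      simp only [hname]
      have hne : pvB_kept (cs.drop j) ≠ [] := by rw [hcons]; simp [pvB_kept, hterm]
      by_cases hnum : pvNumericLike (pvB_kept (cs.drop j)) = true
      · rw [if_pos hnum, if_neg]
        rintro ⟨-, h2⟩
        rw [hnum] at h2
        exact absurd h2 (by simp)
      · rw [if_neg hnum, if_pos ⟨hne, by simpa using hnum⟩]
    · rw [if_neg ha]
      have hcond : ¬(PySem.Chars.strIsalpha ((cs.drop j).take 1) = true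
          ∨ (cs.drop j).take 1 = ['_']) := by
        rw [htake1, pv_strIsalpha_single]
        rintro (h' | h')
        · exact ha (Or.inl h')
        · exact ha (Or.inr (by injection h'))
      unfold pvF
      rw [if_pos hcond]
  · rw [dif_neg hj, List.drop_eq_nil_of_le (by omega)]
    rfl

theorem pvA_loop_eq (cs : List Char) (hdom : ∀ c ∈ cs, pvDomChar c = true) :
    ∀ fuel i acc, cs.length - i ≤ fuel → pvA_loop cs i acc = acc ++ pvGB (cs.drop i) := by
  intro fuel
  induction fuel with
  | zero =>
    intro i acc hle
    rw [pvA_loop, dif_neg (by omega), List.drop_eq_nil_of_le (by omega)]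
    simp [pvGB]
  | succ fuel ih =>
    intro i acc hle
    rw [pvA_loop]
    by_cases h : i < cs.length
    · rw [dif_pos h, List.drop_eq_getElem_cons h, pvGB_cons]
      by_cases hws : pvIsWs cs[i]
      · rw [if_pos hws, ih (i + 1) acc (by omega),
            if_neg (by simp [pv_ws_not_delim _ hws])]
      · rw [if_neg hws]
        by_cases hdel : cs[i] = '(' ∨ cs[i] = ','
        · rw [if_pos hdel]
          have hdelb : pvDelim cs[i] = true := by
            unfold pvDelim
            rcases hdel with h' | h' <;> simp [h']
          rw [if_pos hdelb, pv_leafName_suffix cs i hdom]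
          have hjge : i + 1 ≤ pvA_skipWs cs (i + 1) := pvA_skipWs_ge cs (i + 1)
          have hjle : pvA_skipWs cs (i + 1) ≤ cs.length := pvA_skipWs_le cs (i + 1) (by omega)
          have hwscong : pvGB (cs.drop (i + 1)) = pvGB (cs.drop (pvA_skipWs cs (i + 1))) :=
            pvGB_drop_congr cs (i + 1) (pvA_skipWs cs (i + 1)) hjge hjle
              (fun m hm h1 h2 => pv_ws_not_delim _ (pvA_skipWs_range cs (i + 1) m h1 h2 hm))
          unfold pvEmitA
          by_cases hj : pvA_skipWs cs (i + 1) < cs.length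
          · rw [dif_pos hj, dif_pos hj]
            by_cases ha : PySem.Chars.isalpha cs[pvA_skipWs cs (i + 1)] = true
                ∨ cs[pvA_skipWs cs (i + 1)] = '_'
            · rw [if_pos ha, if_pos ha]
              have hkge : pvA_skipWs cs (i + 1) ≤ pvA_readName cs (pvA_skipWs cs (i + 1)) :=
                pvA_readName_ge cs (pvA_skipWs cs (i + 1))
              have hkle : pvA_readName cs (pvA_skipWs cs (i + 1)) ≤ cs.length :=
                pvA_readName_le cs (pvA_skipWs cs (i + 1)) hjle
              have hnamecong : pvGB (cs.drop (pvA_skipWs cs (i + 1)))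
                  = pvGB (cs.drop (pvA_readName cs (pvA_skipWs cs (i + 1)))) :=
                pvGB_drop_congr cs (pvA_skipWs cs (i + 1))
                  (pvA_readName cs (pvA_skipWs cs (i + 1))) hkge hkle
                  (fun m hm h1 h2 => by
                    have hterm := pvA_readName_range cs (pvA_skipWs cs (i + 1)) m h1 h2 hm
                    cases hdm : pvDelim cs[m] with
                    | false => rfl
                    | true => exact absurd (pv_delim_term _ hdm) (by simp [hterm]))
              by_cases hname :
                  PySem.Chars.strip (PySem.List.slice cs (some ((pvA_skipWs cs (i + 1)) : Int))
                    (some ((pvA_readName cs (pvA_skipWs cs (i + 1))) : Int))) ≠ [] ∧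
                  pvNumericLike (PySem.Chars.strip (PySem.List.slice cs
                    (some ((pvA_skipWs cs (i + 1)) : Int))
                    (some ((pvA_readName cs (pvA_skipWs cs (i + 1))) : Int)))) = false
              · rw [if_pos hname, if_pos hname,
                    ih (pvA_readName cs (pvA_skipWs cs (i + 1))) _ (by omega)]
                rw [hwscong, hnamecong]
                simp
              · rw [if_neg hname, if_neg hname,
                    ih (pvA_readName cs (pvA_skipWs cs (i + 1))) _ (by omega)]
                rw [hwscong, hnamecong]
                simp
            · rw [if_neg ha, if_neg ha, ih (pvA_skipWs cs (i + 1)) acc (by omega), hwscong]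
              simp
          · rw [dif_neg hj, dif_neg hj, ih (pvA_skipWs cs (i + 1)) acc (by omega), hwscong]
            simp
        · rw [if_neg hdel, ih (i + 1) acc (by omega)]
          have hdelb : pvDelim cs[i] = false := by
            cases hdm : pvDelim cs[i] with
            | false => rfl
            | true =>
              unfold pvDelim at hdm
              simp only [Bool.or_eq_true, beq_iff_eq] at hdm
              exact absurd hdm hdel
          rw [if_neg (by simp [hdelb])]
    · rw [dif_neg h, List.drop_eq_nil_of_le (by omega)]
      simp [pvGB]

-- ===== VERDICT (by name: the statement is the Claim_ definition above) =====
theorem extract_leaf_names_robust_spec : Claim_equal_extract_leaf_names_robust := by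
  intro s hdom
  unfold Spec_extract_leaf_names_robust
  have hd : ∀ c ∈ s.toList, pvDomChar c = true := by
    have := hdom
    unfold Dom_extract_leaf_names_robust pvDomStr at this
    simpa [List.all_eq_true] using this
  have hA : extract_leaf_names_robust s = pvGB s.toList := by
    unfold extract_leaf_names_robust
    simpa using pvA_loop_eq s.toList hd s.toList.length 0 [] (by omega)
  have hB : extract_leaf_names_robust_alt s = pvGB s.toList := by
    unfold extract_leaf_names_robust_alt
    simp only [pv_replace_single, pv_splitOn_single, pvSplitC_map,
      PySem.List.slice_from _ (by norm_num : (0 : Int) ≤ 1)]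
    simp [List.drop_one, pv_filterMap_splitD_tail]
  rw [hA, hB]
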